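-- pv_equiv track=rewrite | github.com/deniz-ozcan/Pynar-Flowchart | x.py | Prime_Perfection
-- ===== SOURCE A (Python) =====
-- def Prime_Perfection(n):
--     if(n > 0):
--         total1 = 0
--         for i in range(1, int(n/2)+1):
--             if(n % i == 0):
--                 total1 += i
--         if(total1 == n):
--             return f"{n} is a perfect number."
--         total2 = []
--         for i in range(2, int(n//2)+1):
--             if(n % i == 0):
--                 total2.append(i)
--         if(len(total2) == 0 and n != 0 and n != 1):
--             return f"{n} is a prime number."
--     elif(n == 0):
--         return "Divide by zero error encountered."
--     else:
--         return "Negative numbers can not be one of either a prime numbers or a perfect numbers."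
-- ===== SOURCE B (Python) =====
-- def Prime_Perfection(n):
--     if n > 0:
--         # single O(sqrt n) scan: pair each divisor i <= sqrt(n) with n // i
--         sigma = 0   # sum of all divisors of n
--         cnt = 0     # number of divisors of n
--         i = 1
--         while i * i <= n:
--             if n % i == 0:
--                 j = n // i
--                 sigma += i
--                 cnt += 1
--                 if j != i:
--                     sigma += j
--                     cnt += 1
--             i += 1
--         if sigma - n == n:
--             return f"{n} is a perfect number."
--         if cnt == 2:
--             return f"{n} is a prime number."
--     elif n == 0:
--         return "Divide by zero error encountered."
--     else:
--         return "Negative numbers can not be one of either a prime numbers or a perfect numbers."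
-- ===== Notes on version B (the rewrite author's own statement) =====
-- stated objective: faster
-- what changed: Replaces A's pair of O(n) scans over the range up to n/2 with a single O(sqrt n) loop that pairs each small divisor i with its cofactor n//i, accumulating the full divisor sum and divisor count once; perfect iff that sum minus n equals n, prime iff n has no divisors besides one and itself.
import Mathlib
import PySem

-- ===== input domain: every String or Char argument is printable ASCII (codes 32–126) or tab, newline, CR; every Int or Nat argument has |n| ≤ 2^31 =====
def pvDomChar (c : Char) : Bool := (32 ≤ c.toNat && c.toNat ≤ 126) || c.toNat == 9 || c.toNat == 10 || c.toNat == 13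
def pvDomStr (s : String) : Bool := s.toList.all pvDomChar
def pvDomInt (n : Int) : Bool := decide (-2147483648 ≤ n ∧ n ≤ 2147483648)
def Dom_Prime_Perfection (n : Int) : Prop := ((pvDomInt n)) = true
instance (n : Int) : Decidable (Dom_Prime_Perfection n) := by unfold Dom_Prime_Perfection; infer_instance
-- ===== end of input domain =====

-- B replaces A's two O(n) scans over 1..n/2 by one O(sqrt n) loop pairing each divisor i ≤ sqrt n with n//i.

-- ===== PORT A =====
def Prime_Perfection (n : Int) : Option String :=
  if n > 0 then
    -- total1 = 0; for i in range(1, int(n/2)+1): if n % i == 0: total1 += i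
    -- (for 0 < n ≤ 2^31, int(n/2) is exact and equals n // 2 = floordiv n 2)
    let total1 : Int := (PySem.List.pyRange 1 (PySem.Int.floordiv n 2 + 1) 1).foldl
      (fun acc i => if PySem.Int.mod n i = 0 then acc + i else acc) 0
    if total1 = n then some (PySem.Int.toStr n ++ " is a perfect number.")
    else
      -- total2 = []; for i in range(2, int(n//2)+1): if n % i == 0: total2.append(i)
      let total2 : List Int := (PySem.List.pyRange 2 (PySem.Int.floordiv n 2 + 1) 1).foldl
        (fun acc i => if PySem.Int.mod n i = 0 then acc ++ [i] else acc) []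
      if total2.length = 0 ∧ n ≠ 0 ∧ n ≠ 1 then some (PySem.Int.toStr n ++ " is a prime number.")
      else none
  else if n = 0 then some "Divide by zero error encountered."
  else some "Negative numbers can not be one of either a prime numbers or a perfect numbers."

-- ===== PORT B =====
-- termination helper for the while loop of Source B (i grows, bounded by i*i ≤ n)
theorem pvBLoop_dec (n i : Int) (h : i * i ≤ n) : (n + 1 - (i + 1)).toNat < (n + 1 - i).toNat := by
  have hii : i ≤ i * i := by
    by_cases h0 : i ≤ 0
    · exact h0.trans (mul_self_nonneg i)
    · nlinarith
  omega

-- while i*i <= n: if n % i == 0: j = n//i; sigma += i; cnt += 1; (if j != i: sigma += j; cnt += 1); i += 1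
def pvBLoop (n i sigma cnt : Int) : Int × Int :=
  if h : i * i ≤ n then
    if PySem.Int.mod n i = 0 then
      -- j = n // i
      if PySem.Int.floordiv n i ≠ i then
        pvBLoop n (i + 1) (sigma + i + PySem.Int.floordiv n i) (cnt + 2)
      else pvBLoop n (i + 1) (sigma + i) (cnt + 1)
    else pvBLoop n (i + 1) sigma cnt
  else (sigma, cnt)
termination_by (n + 1 - i).toNat
decreasing_by all_goals exact pvBLoop_dec n i h

def Prime_Perfection_alt (n : Int) : Option String :=
  if n > 0 then
    let p := pvBLoop n 1 0 0
    if p.1 - n = n then some (PySem.Int.toStr n ++ " is a perfect number.")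
    else if p.2 = 2 then some (PySem.Int.toStr n ++ " is a prime number.")
    else none
  else if n = 0 then some "Divide by zero error encountered."
  else some "Negative numbers can not be one of either a prime numbers or a perfect numbers."

-- ===== PRECONDITION & SPEC =====
def Spec_Prime_Perfection (n : Int) (out : Option String) : Prop := out = Prime_Perfection_alt n
instance (n : Int) (out : Option String) : Decidable (Spec_Prime_Perfection n out) := by unfold Spec_Prime_Perfection; infer_instance

-- ===== CLAIM (what is proved, stated in full; the proofs are below) =====
def Claim_equal_Prime_Perfection : Prop := ∀ (n : Int), Dom_Prime_Perfection n → Spec_Prime_Perfection n (Prime_Perfection n)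

-- ===== LEMMAS AND PROOFS =====

-- A's filtered range-sum as a Nat Finset sum
theorem sumA (N a b : ℕ) (ha : 1 ≤ a) :
    ((PySem.List.pyRange (a : Int) (b : Int) 1).filter
        (fun i => decide (PySem.Int.mod (N : Int) i = 0))).sum
      = ((∑ d ∈ Finset.Ico a b, if d ∣ N then d else 0 : ℕ) : Int) := by
  induction b with
  | zero =>
      rw [PySem.List.pyRange_one_eq_nil (by exact_mod_cast Nat.zero_le a)]
      simp
  | succ b ih =>
      by_cases hab : a ≤ b
      · have h1 : (a : Int) ≤ (b : Int) := by exact_mod_cast hab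
        have hc : ((b + 1 : ℕ) : Int) = (b : Int) + 1 := by push_cast; ring
        rw [hc, PySem.List.pyRange_one_succ_right h1, List.filter_append, List.sum_append, ih,
            Finset.sum_Ico_succ_top hab]
        have hb1 : 1 ≤ b := le_trans ha hab
        by_cases hdvd : b ∣ N
        · have hmod : PySem.Int.mod (N : Int) (b : Int) = 0 := by
            rw [PySem.Int.mod_eq_zero_iff_dvd]
            exact_mod_cast hdvd
          simp [List.filter_singleton, hmod, hdvd]
        · have hmod : ¬ PySem.Int.mod (N : Int) (b : Int) = 0 := by
            rw [PySem.Int.mod_eq_zero_iff_dvd]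
            intro h
            exact hdvd (by exact_mod_cast h)
          have hdvd' : ¬ ((b : Int) ∣ (N : Int)) := fun h => hdvd (by exact_mod_cast h)
          simp [List.filter_singleton, hmod, hdvd, hdvd']
      · have h1 : ((b + 1 : ℕ) : Int) ≤ (a : Int) := by exact_mod_cast (by omega : b + 1 ≤ a)
        rw [PySem.List.pyRange_one_eq_nil h1, Finset.Ico_eq_empty (by omega)]
        simp

-- a proper divisor of N is at most N/2
theorem dvd_le_half (N d : ℕ) (hN : 1 ≤ N) (hd : d ∣ N) (hne : d ≠ N) : d ≤ N / 2 := by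
  obtain ⟨k, hk⟩ := hd
  have hk0 : k ≠ 0 := by rintro rfl; omega
  have hk1 : k ≠ 1 := by rintro rfl; rw [Nat.mul_one] at hk; exact hne hk.symm
  have h2 : d * 2 ≤ N := by
    calc d * 2 ≤ d * k := Nat.mul_le_mul_left d (by omega)
    _ = N := hk.symm
  omega

-- proper-divisor sum: A's range sum plus N is the full divisor sum
theorem sum_proper (N : ℕ) (hN : 1 ≤ N) :
    (∑ d ∈ Finset.Ico 1 (N / 2 + 1), if d ∣ N then d else 0) + N = ∑ d ∈ N.divisors, d := by
  have hfil : (Finset.Ico 1 (N / 2 + 1)).filter (· ∣ N) = N.divisors.erase N := by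
    ext d
    simp only [Finset.mem_filter, Finset.mem_Ico, Finset.mem_erase, Nat.mem_divisors]
    constructor
    · rintro ⟨⟨h1, h2⟩, hdvd⟩
      refine ⟨?_, hdvd, by omega⟩
      rintro rfl; omega
    · rintro ⟨hne, hdvd, _⟩
      have hh := dvd_le_half N d hN hdvd hne
      have hd1 : 0 < d := Nat.pos_of_dvd_of_pos hdvd hN
      exact ⟨⟨hd1, by omega⟩, hdvd⟩
  rw [← Finset.sum_filter, hfil]
  exact Finset.sum_erase_add N.divisors _ (Nat.mem_divisors_self N (by omega))

-- primality as seen by A's second scan vs the divisor count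
theorem prime_iff_card (N : ℕ) (hN : 1 ≤ N) :
    ((∀ d : ℕ, 2 ≤ d → d ≤ N / 2 → ¬ d ∣ N) ∧ N ≠ 1) ↔ N.divisors.card = 2 := by
  have hN0 : N ≠ 0 := by omega
  have h1 : 1 ∈ N.divisors := Nat.one_mem_divisors.mpr hN0
  have hNmem : N ∈ N.divisors := Nat.mem_divisors_self N hN0
  constructor
  · rintro ⟨hno, hne1⟩
    have hNd : N.divisors = {1, N} := by
      apply Finset.Subset.antisymm
      · intro d hd
        rw [Nat.mem_divisors] at hd
        simp only [Finset.mem_insert, Finset.mem_singleton]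
        by_contra hcon
        push_neg at hcon
        obtain ⟨hd1, hdN⟩ := hcon
        have hhalf := dvd_le_half N d hN hd.1 hdN
        have hdpos : 0 < d := Nat.pos_of_dvd_of_pos hd.1 hN
        exact hno d (by omega) hhalf hd.1
      · intro d hd
        simp only [Finset.mem_insert, Finset.mem_singleton] at hd
        rcases hd with rfl | rfl <;> assumption
    rw [hNd, Finset.card_insert_of_notMem (by simp; omega), Finset.card_singleton]
  · intro hcard
    have hne1 : N ≠ 1 := by
      rintro rfl
      rw [Nat.divisors_one] at hcard
      simp at hcard
    refine ⟨?_, hne1⟩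
    intro d hd2 hdh hdvd
    have hN2 : 2 ≤ N := by omega
    have hdN : d < N := by omega
    have hdmem : d ∈ N.divisors := Nat.mem_divisors.mpr ⟨hdvd, hN0⟩
    have hsub : ({1, d, N} : Finset ℕ) ⊆ N.divisors := by
      intro x hx
      simp only [Finset.mem_insert, Finset.mem_singleton] at hx
      rcases hx with rfl | rfl | rfl <;> assumption
    have hcard3 : ({1, d, N} : Finset ℕ).card = 3 := by
      rw [Finset.card_insert_of_notMem (by simp; omega),
          Finset.card_insert_of_notMem (by simp; omega), Finset.card_singleton]
    have := Finset.card_le_card hsub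
    omega

-- for a divisor d of N, the cofactor is large iff d is small
theorem div_sq_gt_iff (N d : ℕ) (hN : 1 ≤ N) (hd : d ∣ N) :
    N < (N / d) * (N / d) ↔ d * d < N := by
  have hd0 : 0 < d := Nat.pos_of_dvd_of_pos hd hN
  have hq : d * (N / d) = N := Nat.mul_div_cancel' hd
  have hq0 : 0 < N / d := Nat.div_pos (Nat.le_of_dvd hN hd) hd0
  constructor
  · intro h
    have hdq : d < N / d := by
      by_contra hle
      push_neg at hle
      have := Nat.mul_le_mul_right (N / d) hle
      rw [hq] at this
      omega
    calc d * d < (N / d) * d := Nat.mul_lt_mul_of_lt_of_le hdq (le_refl d) hd0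
    _ = d * (N / d) := Nat.mul_comm _ _
    _ = N := hq
  · intro h
    have hdq : d < N / d := by
      by_contra hle
      push_neg at hle
      have := Nat.mul_le_mul_left d hle
      rw [hq] at this
      omega
    calc N = d * (N / d) := hq.symm
    _ < (N / d) * (N / d) := by exact Nat.mul_lt_mul_of_lt_of_le hdq (le_refl _) hq0

-- pairing: summing f over large divisors = summing f(cofactor) over strictly small divisors
theorem pairing (N : ℕ) (hN : 1 ≤ N) (f : ℕ → ℕ) :
    ∑ d ∈ N.divisors.filter (fun d => d * d ≤ N), (if N / d ≠ d then f (N / d) else 0)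
      = ∑ d ∈ N.divisors.filter (fun d => ¬ d * d ≤ N), f d := by
  have step1 : ∀ d ∈ N.divisors.filter (fun d => d * d ≤ N),
      (if N / d ≠ d then f (N / d) else 0) = (if N < (N / d) * (N / d) then f (N / d) else 0) := by
    intro d hd
    simp only [Finset.mem_filter, Nat.mem_divisors] at hd
    obtain ⟨⟨hdvd, hN0⟩, hsq⟩ := hd
    have hd0 : 0 < d := Nat.pos_of_dvd_of_pos hdvd hN
    have hq : d * (N / d) = N := Nat.mul_div_cancel' hdvd
    by_cases hlt : d * d < N
    · have ha1 : N / d ≠ d := by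
        intro he
        rw [he] at hq
        omega
      have ha2 : N < (N / d) * (N / d) := (div_sq_gt_iff N d hN hdvd).mpr hlt
      simp [ha1, ha2]
    · have heq : d * d = N := by omega
      have ha1 : N / d = d := by
        rw [← heq]
        exact Nat.mul_div_cancel_left d hd0
      have ha2 : ¬ N < (N / d) * (N / d) := by rw [ha1]; omega
      have ha3 : ¬ N < d * d := by omega
      simp [ha1, ha2, ha3]
  rw [Finset.sum_congr rfl step1]
  have step2 : ∑ d ∈ N.divisors.filter (fun d => d * d ≤ N),
        (if N < (N / d) * (N / d) then f (N / d) else 0)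
      = ∑ d ∈ N.divisors, (if N < (N / d) * (N / d) then f (N / d) else 0) := by
    apply Finset.sum_subset (Finset.filter_subset _ _)
    intro d hd hnot
    simp only [Finset.mem_filter, hd, true_and] at hnot
    have hdvd := (Nat.mem_divisors.mp hd).1
    have hno : ¬ N < (N / d) * (N / d) := by
      rw [div_sq_gt_iff N d hN hdvd]
      omega
    simp [hno]
  rw [step2, Nat.sum_div_divisors N (fun x => if N < x * x then f x else 0), Finset.sum_filter]
  apply Finset.sum_congr rfl
  intro d _
  by_cases h : d * d ≤ N
  · have h2 : ¬ N < d * d := by omega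
    simp [h, h2]
  · have h2 : N < d * d := by omega
    simp [h, h2]

theorem small_filter (N : ℕ) (hN : 1 ≤ N) :
    (Finset.Ico 1 (Nat.sqrt N + 1)).filter (· ∣ N) = N.divisors.filter (fun d => d * d ≤ N) := by
  ext d
  simp only [Finset.mem_filter, Finset.mem_Ico, Nat.mem_divisors, Nat.lt_succ_iff]
  constructor
  · rintro ⟨⟨h1, h2⟩, hdvd⟩
    exact ⟨⟨hdvd, by omega⟩, Nat.le_sqrt.mp h2⟩
  · rintro ⟨⟨hdvd, hN0⟩, hsq⟩
    exact ⟨⟨Nat.pos_of_dvd_of_pos hdvd hN, Nat.le_sqrt.mpr hsq⟩, hdvd⟩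

theorem pairing_sigma (N : ℕ) (hN : 1 ≤ N) :
    ∑ j ∈ Finset.Ico 1 (Nat.sqrt N + 1),
        (if j ∣ N then j + (if N / j ≠ j then N / j else 0) else 0)
      = ∑ d ∈ N.divisors, d := by
  rw [← Finset.sum_filter, small_filter N hN, Finset.sum_add_distrib, pairing N hN (fun x => x),
      Finset.sum_filter_add_sum_filter_not N.divisors (fun d => d * d ≤ N) (fun d => d)]

theorem pairing_tau (N : ℕ) (hN : 1 ≤ N) :
    ∑ j ∈ Finset.Ico 1 (Nat.sqrt N + 1),
        (if j ∣ N then 1 + (if N / j ≠ j then 1 else 0) else 0)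
      = N.divisors.card := by
  rw [← Finset.sum_filter, small_filter N hN, Finset.sum_add_distrib, pairing N hN (fun _ => 1),
      Finset.sum_filter_add_sum_filter_not N.divisors (fun d => d * d ≤ N) (fun _ => 1),
      Finset.card_eq_sum_ones]

-- B's loop computes the two Finset sums from its current index up
theorem pvBLoop_eq (N : ℕ) (hN : 1 ≤ N) (i sigma cnt : Int) (hi : 1 ≤ i) :
    pvBLoop (N : Int) i sigma cnt
      = (sigma + ((∑ j ∈ Finset.Ico i.toNat (Nat.sqrt N + 1),
            if j ∣ N then j + (if N / j ≠ j then N / j else 0) else 0 : ℕ) : Int),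
         cnt + ((∑ j ∈ Finset.Ico i.toNat (Nat.sqrt N + 1),
            if j ∣ N then 1 + (if N / j ≠ j then 1 else 0) else 0 : ℕ) : Int)) := by
  suffices H : ∀ (fuel : ℕ) (i sigma cnt : Int), 1 ≤ i → Nat.sqrt N + 1 - i.toNat ≤ fuel →
      pvBLoop (N : Int) i sigma cnt
        = (sigma + ((∑ j ∈ Finset.Ico i.toNat (Nat.sqrt N + 1),
              if j ∣ N then j + (if N / j ≠ j then N / j else 0) else 0 : ℕ) : Int),
           cnt + ((∑ j ∈ Finset.Ico i.toNat (Nat.sqrt N + 1),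
              if j ∣ N then 1 + (if N / j ≠ j then 1 else 0) else 0 : ℕ) : Int)) by
    exact H (Nat.sqrt N + 1 - i.toNat) i sigma cnt hi le_rfl
  intro fuel
  induction fuel with
  | zero =>
      intro i sigma cnt hi hf
      obtain ⟨i', rfl⟩ : ∃ i' : ℕ, i = (i' : Int) := ⟨i.toNat, (Int.toNat_of_nonneg (by omega)).symm⟩
      rw [Int.toNat_natCast] at hf ⊢
      have hgt : ¬ (i' : Int) * (i' : Int) ≤ (N : Int) := by
        intro hcon
        have h2 : i' * i' ≤ N := by exact_mod_cast hcon
        have := Nat.le_sqrt.mpr h2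
        omega
      rw [pvBLoop, dif_neg hgt, Finset.Ico_eq_empty (by omega)]
      simp
  | succ fuel ih =>
      intro i sigma cnt hi hf
      obtain ⟨i', rfl⟩ : ∃ i' : ℕ, i = (i' : Int) := ⟨i.toNat, (Int.toNat_of_nonneg (by omega)).symm⟩
      rw [Int.toNat_natCast] at hf ⊢
      have hi1 : 1 ≤ i' := by exact_mod_cast hi
      by_cases hle : (i' : Int) * (i' : Int) ≤ (N : Int)
      · have hsm : i' ≤ Nat.sqrt N := Nat.le_sqrt.mpr (by exact_mod_cast hle)
        have hltb : i' < Nat.sqrt N + 1 := by omega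
        have hcast1 : ((i' : Int) + 1) = ((i' + 1 : ℕ) : Int) := by push_cast; ring
        have hihx : ∀ s c : Int, pvBLoop (N : Int) ((i' + 1 : ℕ) : Int) s c
            = (s + ((∑ j ∈ Finset.Ico (i' + 1) (Nat.sqrt N + 1),
                  if j ∣ N then j + (if N / j ≠ j then N / j else 0) else 0 : ℕ) : Int),
               c + ((∑ j ∈ Finset.Ico (i' + 1) (Nat.sqrt N + 1),
                  if j ∣ N then 1 + (if N / j ≠ j then 1 else 0) else 0 : ℕ) : Int)) := by
          intro s c
          have hx := ih ((i' + 1 : ℕ) : Int) s c (by exact_mod_cast Nat.le_add_left 1 i')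
            (by rw [Int.toNat_natCast]; omega)
          rwa [Int.toNat_natCast] at hx
        rw [pvBLoop, dif_pos hle,
            Finset.sum_eq_sum_Ico_succ_bot hltb
              (fun j => if j ∣ N then j + (if N / j ≠ j then N / j else 0) else 0),
            Finset.sum_eq_sum_Ico_succ_bot hltb
              (fun j => if j ∣ N then 1 + (if N / j ≠ j then 1 else 0) else 0)]
        by_cases hdvd : i' ∣ N
        · have hmod : PySem.Int.mod (N : Int) (i' : Int) = 0 := by
            rw [PySem.Int.mod_eq_zero_iff_dvd]
            exact_mod_cast hdvd
          have hfd : PySem.Int.floordiv (N : Int) (i' : Int) = ((N / i' : ℕ) : Int) := by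
            exact_mod_cast PySem.Int.floordiv_natCast N i'
          rw [if_pos hmod, hfd]
          by_cases hne : N / i' = i'
          · have hjeq : ¬ (((N / i' : ℕ) : Int) ≠ (i' : Int)) := by
              simp [hne]
            rw [if_neg hjeq, hcast1, hihx]
            simp only [hdvd, if_true, hne, ne_eq, not_true_eq_false, if_false]
            refine Prod.ext ?_ ?_ <;> simp <;> push_cast <;> ring
          · have hjne : (((N / i' : ℕ) : Int) ≠ (i' : Int)) := by
              intro h
              exact hne (by exact_mod_cast h)
            rw [if_pos hjne, hcast1, hihx]
            simp only [hdvd, if_true, hne, ne_eq, not_false_eq_true]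
            refine Prod.ext ?_ ?_ <;> simp [hne] <;> push_cast <;> ring
        · have hmod : ¬ PySem.Int.mod (N : Int) (i' : Int) = 0 := by
            rw [PySem.Int.mod_eq_zero_iff_dvd]
            intro h
            exact hdvd (by exact_mod_cast h)
          rw [if_neg hmod, hcast1, hihx]
          simp only [hdvd, if_false]
          refine Prod.ext ?_ ?_ <;> simp [hdvd]
      · have hnat : ¬ i' * i' ≤ N := fun hcon => hle (by exact_mod_cast hcon)
        have hlt : Nat.sqrt N < i' := by
          by_contra hc
          push_neg at hc
          exact hnat (Nat.le_sqrt.mp hc)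
        rw [pvBLoop, dif_neg hle, Finset.Ico_eq_empty (by omega)]
        simp

-- ===== VERDICT (by name: the statement is the Claim_ definition above) =====
theorem Prime_Perfection_spec : Claim_equal_Prime_Perfection := by
  intro n _
  unfold Spec_Prime_Perfection
  by_cases hpos : n > 0
  · obtain ⟨N, rfl⟩ : ∃ N : ℕ, n = (N : Int) := ⟨n.toNat, (Int.toNat_of_nonneg hpos.le).symm⟩
    have hN : 1 ≤ N := by exact_mod_cast hpos
    have hm1 : PySem.Int.floordiv ((N : ℕ) : Int) 2 + 1 = ((N / 2 + 1 : ℕ) : Int) := by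
      have : PySem.Int.floordiv ((N : ℕ) : Int) 2 = ((N / 2 : ℕ) : Int) := by
        exact_mod_cast PySem.Int.floordiv_natCast N 2
      rw [this]
      push_cast
      ring
    -- A's first loop is the proper-divisor sum
    have htot1 : (PySem.List.pyRange 1 (PySem.Int.floordiv ((N : ℕ) : Int) 2 + 1) 1).foldl
        (fun acc i => if PySem.Int.mod ((N : ℕ) : Int) i = 0 then acc + i else acc) 0
        = ((∑ d ∈ Finset.Ico 1 (N / 2 + 1), if d ∣ N then d else 0 : ℕ) : Int) := by
      rw [hm1, PySem.List.foldl_ite_eq_foldl_filter, ← List.sum_eq_foldl]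
      have hx := sumA N 1 (N / 2 + 1) le_rfl
      simp only [Nat.cast_one] at hx
      exact hx
    -- A's second loop is the filtered range
    have htot2 : (PySem.List.pyRange 2 (PySem.Int.floordiv ((N : ℕ) : Int) 2 + 1) 1).foldl
        (fun acc i => if PySem.Int.mod ((N : ℕ) : Int) i = 0 then acc ++ [i] else acc) ([] : List Int)
        = (PySem.List.pyRange 2 ((N / 2 + 1 : ℕ) : Int) 1).filter
            (fun i => decide (PySem.Int.mod ((N : ℕ) : Int) i = 0)) := by
      rw [hm1, PySem.List.foldl_append_ite_eq_filter]
      simp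
    have hempty : ((PySem.List.pyRange 2 ((N / 2 + 1 : ℕ) : Int) 1).filter
          (fun i => decide (PySem.Int.mod ((N : ℕ) : Int) i = 0)) = [])
        ↔ (∀ d : ℕ, 2 ≤ d → d ≤ N / 2 → ¬ d ∣ N) := by
      rw [List.filter_eq_nil_iff]
      constructor
      · intro h d h2 hh hdvd
        have hmem : (d : Int) ∈ PySem.List.pyRange 2 ((N / 2 + 1 : ℕ) : Int) 1 :=
          PySem.List.mem_pyRange_one.mpr ⟨by exact_mod_cast h2, by exact_mod_cast Nat.lt_succ_of_le hh⟩
        have hx := h _ hmem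
        simp only [decide_eq_true_eq] at hx
        apply hx
        rw [PySem.Int.mod_eq_zero_iff_dvd]
        exact_mod_cast hdvd
      · intro h i hmem
        rw [PySem.List.mem_pyRange_one] at hmem
        obtain ⟨d, rfl⟩ : ∃ d : ℕ, i = (d : Int) :=
          ⟨i.toNat, (Int.toNat_of_nonneg (by omega)).symm⟩
        simp only [decide_eq_true_eq]
        rw [PySem.Int.mod_eq_zero_iff_dvd]
        intro hdvd
        exact h d (by exact_mod_cast hmem.1) (by omega) (by exact_mod_cast hdvd)
    -- B's loop computes divisor sum and divisor count
    have hB : pvBLoop ((N : ℕ) : Int) 1 0 0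
        = (((∑ d ∈ N.divisors, d : ℕ) : Int), ((N.divisors.card : ℕ) : Int)) := by
      have hx := pvBLoop_eq N hN 1 0 0 le_rfl
      rw [Int.toNat_one] at hx
      rw [hx, pairing_sigma N hN, pairing_tau N hN]
      simp
    -- the two perfect tests agree, and the two prime tests agree
    have hPS := sum_proper N hN
    have hC1 : (((∑ d ∈ Finset.Ico 1 (N / 2 + 1), if d ∣ N then d else 0 : ℕ) : Int) = (N : Int))
        ↔ (((∑ d ∈ N.divisors, d : ℕ) : Int) - (N : Int) = (N : Int)) := by
      omega
    have hPC := prime_iff_card N hN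
    have hC2 : ((∀ d : ℕ, 2 ≤ d → d ≤ N / 2 → ¬ d ∣ N) ∧ ((N : Int) ≠ 0 ∧ (N : Int) ≠ 1))
        ↔ (((N.divisors.card : ℕ) : Int) = 2) := by
      constructor
      · rintro ⟨ha, _, hb⟩
        have : N ≠ 1 := by exact_mod_cast hb
        exact_mod_cast hPC.mp ⟨ha, this⟩
      · intro h
        obtain ⟨ha, hb⟩ := hPC.mpr (by exact_mod_cast h)
        exact ⟨ha, by omega, by exact_mod_cast hb⟩
    simp only [Prime_Perfection, Prime_Perfection_alt, if_pos hpos, htot1, htot2, hB]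
    by_cases c1 : ((∑ d ∈ Finset.Ico 1 (N / 2 + 1), if d ∣ N then d else 0 : ℕ) : Int) = (N : Int)
    · rw [if_pos c1, if_pos (hC1.mp c1)]
    · rw [if_neg c1, if_neg (fun h => c1 (hC1.mpr h))]
      by_cases c2 : ((N.divisors.card : ℕ) : Int) = 2
      · have hc2' := hC2.mpr c2
        rw [if_pos ?_, if_pos c2]
        · refine ⟨?_, hc2'.2⟩
          rw [List.length_eq_zero_iff, hempty]
          exact hc2'.1
      · rw [if_neg c2, if_neg ?_]
        rintro ⟨hlen, hne0, hne1⟩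
        apply c2
        apply hC2.mp
        rw [List.length_eq_zero_iff, hempty] at hlen
        exact ⟨hlen, hne0, hne1⟩
  · simp only [Prime_Perfection, Prime_Perfection_alt, if_neg hpos]
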